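-- pv_equiv track=rewrite | github.com/christj6/letterboxed | letterboxed.py | word_is_valid
-- ===== SOURCE A (Python) =====
-- def word_is_valid(word):
--     for i in range(0, len(word)):
--         if i == len(word) - 1:
--             return True
--
--         if word[i] in top and word[i+1] in except_top:
--             continue
--         elif word[i] in bottom and word[i+1] in except_bottom:
--             continue
--         elif word[i] in right and word[i+1] in except_right:
--             continue
--         elif word[i] in left and word[i+1] in except_left:
--             continue
--         else:
--             return False
--
-- top = ['e', 'i','f']
--
-- left = ['o', 'n','u']
--
-- right = ['b', 'a','q']
--
-- bottom = ['c', 'l','m']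
--
-- except_top = left + right + bottom
--
-- except_left = top + right + bottom
--
-- except_right = top + left + bottom
--
-- except_bottom = top + left + right
-- ===== SOURCE B (Python) =====
-- def word_is_valid(word):
--     if len(word) < 2:
--         return True  # A returns True for any single letter; the empty word is outside Pre_
--     # Stage 1: translate the word into side ids by position arithmetic on one board string
--     # ('eifonubaqclm'[3k:3k+3] is side k; an unknown letter gets -1).
--     sides = ["eifonubaqclm".find(c) // 3 for c in word]
--     # Stage 2: valid iff every letter is on the board and no adjacent pair shares a side.
--     return min(sides) >= 0 and all(a != b for a, b in zip(sides, sides[1:]))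
-- ===== Notes on version B (the rewrite author's own statement) =====
-- stated objective: alternative
-- what changed: Replaced A's single pass of four-way elif membership tests over eight side lists by a staged computation: a short-word base case, then a map of the word to numeric side ids via position arithmetic on a single 12-letter board string (find, then floor division by 3), then a global min>=0 on-board check plus an adjacent-inequality scan over the id list.
-- outside the precondition, e.g. on word_is_valid(''): A returns None, B returns True
import Mathlib
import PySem

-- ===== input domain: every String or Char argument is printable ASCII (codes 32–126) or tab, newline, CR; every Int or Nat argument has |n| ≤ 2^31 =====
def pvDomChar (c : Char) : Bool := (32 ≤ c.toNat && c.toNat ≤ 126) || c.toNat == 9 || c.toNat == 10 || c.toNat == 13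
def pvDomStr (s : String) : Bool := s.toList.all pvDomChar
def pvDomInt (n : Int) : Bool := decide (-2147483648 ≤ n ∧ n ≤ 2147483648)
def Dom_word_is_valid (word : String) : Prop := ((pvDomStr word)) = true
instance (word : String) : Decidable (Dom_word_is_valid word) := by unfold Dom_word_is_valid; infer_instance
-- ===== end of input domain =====

-- B replaces A's four-way elif membership cascade by staged passes: a base case for
-- short words, a map of the word to numeric side ids by position arithmetic on one board string,
-- then a global min>=0 check plus an adjacent-inequality scan (alternative; same O(n)).

-- ===== PORT A =====
def pvTop : List Char := ['e', 'i', 'f']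
def pvLeft : List Char := ['o', 'n', 'u']
def pvRight : List Char := ['b', 'a', 'q']
def pvBottom : List Char := ['c', 'l', 'm']
def pvExceptTop : List Char := pvLeft ++ pvRight ++ pvBottom
def pvExceptLeft : List Char := pvTop ++ pvRight ++ pvBottom
def pvExceptRight : List Char := pvTop ++ pvLeft ++ pvBottom
def pvExceptBottom : List Char := pvTop ++ pvLeft ++ pvRight

-- the for-loop over i, looking at word[i] and word[i+1]; the [] case is the loop
-- running out (Python returns None there — excluded by Pre_)
def word_is_valid_loop : List Char → Bool
  | [] => false
  | [_] => true
  | c :: d :: rest =>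
    if pvTop.contains c && pvExceptTop.contains d then word_is_valid_loop (d :: rest)
    else if pvBottom.contains c && pvExceptBottom.contains d then word_is_valid_loop (d :: rest)
    else if pvRight.contains c && pvExceptRight.contains d then word_is_valid_loop (d :: rest)
    else if pvLeft.contains c && pvExceptLeft.contains d then word_is_valid_loop (d :: rest)
    else false

def word_is_valid (word : String) : Bool := word_is_valid_loop word.toList

-- ===== PORT B =====
-- "eifonubaqclm".find(c) // 3  (find of the one-char string, then Python floor division)
def pvSide (c : Char) : Int :=
  PySem.Int.floordiv (PySem.Str.find "eifonubaqclm" (String.singleton c)) 3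

def word_is_valid_alt (word : String) : Bool :=
  if word.toList.length < 2 then true
  else
    let sides := word.toList.map pvSide
    match PySem.List.min? sides (fun x => x) with
    | some m =>
        decide (0 ≤ m) &&
        ((sides.zip (PySem.List.slice sides (some 1) none)).all fun p => !(p.1 == p.2))
    | none => false   -- unreachable: sides is nonempty here (min() of [] raises in Python)

-- ===== PRECONDITION & SPEC =====
-- Pre_ excludes only the empty word, on which A falls through the loop and returns
-- None instead of a bool (B returns True there).
def Pre_word_is_valid (word : String) : Prop := word ≠ ""
instance (word : String) : Decidable (Pre_word_is_valid word) := by unfold Pre_word_is_valid; infer_instance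
def pvWitness_word_is_valid : String := "no"

def Spec_word_is_valid (word : String) (out : Bool) : Prop := out = word_is_valid_alt word
instance (word : String) (out : Bool) : Decidable (Spec_word_is_valid word out) := by unfold Spec_word_is_valid; infer_instance

-- ===== CLAIM (what is proved, stated in full; the proofs are below) =====
def Claim_equal_word_is_valid : Prop := ∀ (word : String), Dom_word_is_valid word → Pre_word_is_valid word → Spec_word_is_valid word (word_is_valid word)

-- ===== LEMMAS AND PROOFS =====

def pvLetters : List Char := ['e','i','f','o','n','u','b','a','q','c','l','m']

-- the per-pair test A's loop body performs
def pvAPred (c d : Char) : Bool :=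
  (pvTop.contains c && pvExceptTop.contains d) ||
  (pvBottom.contains c && pvExceptBottom.contains d) ||
  (pvRight.contains c && pvExceptRight.contains d) ||
  (pvLeft.contains c && pvExceptLeft.contains d)

-- the per-pair condition B's two stages jointly impose
def pvBPred (c d : Char) : Bool :=
  decide (0 ≤ pvSide c) && decide (0 ≤ pvSide d) && !(pvSide c == pvSide d)

theorem pv_side_unknown {c : Char} (hc : c ∉ pvLetters) : pvSide c = -1 := by
  have hL : ("eifonubaqclm" : String).toList = pvLetters := by decide
  have hfind : PySem.Str.find "eifonubaqclm" (String.singleton c) = -1 := by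
    rw [PySem.Str.find_eq_neg_one_iff]
    intro h
    exact hc (hL ▸ h.subset (by simp))
  unfold pvSide
  rw [hfind]
  decide

theorem pv_not_on_board {c : Char} (hc : c ∉ pvLetters) :
    c ∉ pvTop ∧ c ∉ pvBottom ∧ c ∉ pvRight ∧ c ∉ pvLeft ∧
    c ∉ pvExceptTop ∧ c ∉ pvExceptBottom ∧ c ∉ pvExceptRight ∧ c ∉ pvExceptLeft := by
  simp [pvLetters] at hc
  simp [pvTop, pvBottom, pvRight, pvLeft, pvExceptTop, pvExceptBottom,
        pvExceptRight, pvExceptLeft]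
  obtain ⟨h1,h2,h3,h4,h5,h6,h7,h8,h9,h10,h11,h12⟩ := hc
  exact ⟨⟨h1,h2,h3⟩,⟨h10,h11,h12⟩,⟨h7,h8,h9⟩,⟨h4,h5,h6⟩,
         ⟨h4,h5,h6,h7,h8,h9,h10,h11,h12⟩,⟨h1,h2,h3,h4,h5,h6,h7,h8,h9⟩,
         ⟨h1,h2,h3,h4,h5,h6,h10,h11,h12⟩,⟨h1,h2,h3,h7,h8,h9,h10,h11,h12⟩⟩

theorem pv_pair_eq (c d : Char) : pvAPred c d = pvBPred c d := by
  by_cases hc : c ∈ pvLetters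
  · by_cases hd : d ∈ pvLetters
    · fin_cases hc <;> fin_cases hd <;> decide
    · obtain ⟨-,-,-,-,h5,h6,h7,h8⟩ := pv_not_on_board hd
      simp [pvAPred, pvBPred, h5, h6, h7, h8, pv_side_unknown hd]
  · obtain ⟨h1,h2,h3,h4,-,-,-,-⟩ := pv_not_on_board hc
    simp [pvAPred, pvBPred, h1, h2, h3, h4, pv_side_unknown hc]

-- A's loop computes the all-adjacent-pairs conjunction of pvAPred
theorem pv_loop_eq : ∀ (l : List Char), l ≠ [] →
    word_is_valid_loop l = (l.zip l.tail).all fun p => pvAPred p.1 p.2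
  | [], h => absurd rfl h
  | [_], _ => by simp [word_is_valid_loop]
  | c :: d :: rest, _ => by
    have ih := pv_loop_eq (d :: rest) (by simp)
    rw [List.tail_cons] at ih
    simp only [List.tail_cons, List.zip_cons_cons, List.all_cons]
    rw [← ih]
    simp only [word_is_valid_loop, pvAPred]
    split_ifs <;> simp_all

-- fusing B's two stages: for words of length ≥ 2, (everything ≥ 0) && (adjacent ids
-- differ) is the all-adjacent-pairs conjunction of pvBPred on the original letters
theorem pv_fuse : ∀ (l : List Char), 2 ≤ l.length →
    ((l.map pvSide).all (fun x => decide (0 ≤ x)) &&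
     (((l.map pvSide).zip (l.map pvSide).tail).all fun p => !(p.1 == p.2)))
    = (l.zip l.tail).all fun p => pvBPred p.1 p.2
  | c :: d :: rest, _ => by
    cases rest with
    | nil =>
      rw [Bool.eq_iff_iff]
      simp [pvBPred]
    | cons e t =>
      have ih := pv_fuse (d :: e :: t) (by simp)
      simp only [List.map_cons, List.tail_cons, List.zip_cons_cons, List.all_cons] at ih ⊢
      rw [← ih, Bool.eq_iff_iff]
      simp only [Bool.and_eq_true, pvBPred]
      constructor <;> intro h <;> simp_all

theorem pv_min_all (l : List Int) (m : Int)
    (h : PySem.List.min? l (fun x => x) = some m) :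
    decide (0 ≤ m) = l.all fun x => decide (0 ≤ x) := by
  have hmem := PySem.List.min?_mem h
  have hmin := PySem.List.min?_isMin h
  by_cases h0 : 0 ≤ m
  · simp [h0]
    intro x hx
    exact le_trans h0 (hmin x hx)
  · simp [h0]
    exact ⟨m, hmem, by omega⟩

-- ===== VERDICT (by name: the statement is the Claim_ definition above) =====
theorem word_is_valid_spec : Claim_equal_word_is_valid := by
  intro word _ hpre
  unfold Spec_word_is_valid word_is_valid word_is_valid_alt
  have hne : word.toList ≠ [] := by
    intro h
    exact hpre (by simpa [String.toList_eq_nil_iff] using h)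
  rw [pv_loop_eq word.toList hne]
  by_cases hlen : word.toList.length < 2
  · simp only [if_pos hlen]
    match word.toList, hne, hlen with
    | [c], _, _ => simp [pvAPred]
  · simp only [if_neg hlen]
    have h2 : 2 ≤ word.toList.length := by omega
    have hsne : word.toList.map pvSide ≠ [] := by
      simp [hne]
    obtain ⟨m, hm⟩ : ∃ m, PySem.List.min? (word.toList.map pvSide) (fun x => x) = some m := by
      cases hmin : PySem.List.min? (word.toList.map pvSide) (fun x => x) with
      | none => exact absurd ((PySem.List.min?_eq_none_iff _ _).mp hmin) hsne
      | some m => exact ⟨m, rfl⟩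
    rw [hm]
    show ((word.toList.zip word.toList.tail).all fun p => pvAPred p.1 p.2) =
      (decide (0 ≤ m) &&
        ((List.map pvSide word.toList).zip
          (PySem.List.slice (List.map pvSide word.toList) (some 1))).all fun p => !p.1 == p.2)
    rw [PySem.List.slice_from_one, pv_min_all _ _ hm, pv_fuse word.toList h2]
    exact congrArg _ (funext fun p => pv_pair_eq p.1 p.2)
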